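-- pv_equiv track=rewrite | github.com/Srijan142003/Research-AI | research_analyzer.py | extract_limitations_scope
-- ===== SOURCE A (Python) =====
-- def extract_limitations_scope(analysis: str) -> str:
--     """
--     Extract limitations and scope from the analysis text.
--     This is a simple heuristic; for more accuracy, use an LLM.
--     """
--     # You can improve this extraction logic as needed.
--     lines = []
--     capture = False
--     for line in analysis.splitlines():
--         if "limitation" in line.lower() or "scope" in line.lower():
--             capture = True
--         if capture:
--             lines.append(line)
--             # Stop after a few lines or at next section
--             if any(x in line.lower() for x in ["application", "potential", "relationship", "finding", "conclusion"]):
--                 break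
--     return "\n".join(lines).strip()
-- ===== SOURCE B (Python) =====
-- STOP_WORDS = ("application", "potential", "relationship", "finding", "conclusion")
--
--
-- def _is_start(line):
--     low = line.lower()
--     return "limitation" in low or "scope" in low
--
--
-- def _is_stop(line):
--     low = line.lower()
--     return any(x in low for x in STOP_WORDS)
--
--
-- def extract_limitations_scope(analysis: str) -> str:
--     lines = analysis.splitlines()
--     start = next((i for i, l in enumerate(lines) if _is_start(l)), None)
--     if start is None:
--         return ""
--     tail = lines[start:]
--     stop = next((i for i, l in enumerate(tail) if _is_stop(l)), None)
--     selected = tail if stop is None else tail[:stop + 1]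
--     return "\n".join(selected).strip()
-- ===== Notes on version B (the rewrite author's own statement) =====
-- stated objective: alternative
-- what changed: Replaced the stateful capture-flag scan (a single loop carrying a boolean and an accumulator with a break) by a locate-then-slice decomposition: find the start index, find the first stop index in the tail, and take a slice; no capture state or accumulator loop remains.
import Mathlib
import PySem

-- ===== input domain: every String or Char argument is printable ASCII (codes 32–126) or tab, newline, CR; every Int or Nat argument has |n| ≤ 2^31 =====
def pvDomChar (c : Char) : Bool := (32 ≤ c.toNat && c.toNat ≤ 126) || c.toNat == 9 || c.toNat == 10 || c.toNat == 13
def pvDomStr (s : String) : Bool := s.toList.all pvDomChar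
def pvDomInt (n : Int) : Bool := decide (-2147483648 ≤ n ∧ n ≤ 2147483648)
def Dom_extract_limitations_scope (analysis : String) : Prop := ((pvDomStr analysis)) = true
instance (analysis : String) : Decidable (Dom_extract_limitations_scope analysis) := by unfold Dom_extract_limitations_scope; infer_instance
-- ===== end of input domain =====

-- B replaces A's stateful capture-flag loop by a locate-then-slice decomposition (objective: alternative).

-- ===== PORT A =====
-- A's capture-flag loop with break, transliterated as structural recursion over the lines,
-- carrying the capture flag and the accumulated lines.
def pvLoopA : List String → Bool → List String → List String
  | [], _, acc => acc
  | line :: rest, capture, acc =>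
    let capture :=
      if PySem.Str.isIn "limitation" (PySem.Str.lower line) ||
         PySem.Str.isIn "scope" (PySem.Str.lower line) then true else capture
    if capture then
      let acc := acc ++ [line]
      if ["application", "potential", "relationship", "finding", "conclusion"].any
           (fun x => PySem.Str.isIn x (PySem.Str.lower line)) then
        acc
      else
        pvLoopA rest capture acc
    else
      pvLoopA rest capture acc

def extract_limitations_scope (analysis : String) : String :=
  PySem.Str.strip (PySem.Str.join "\n" (pvLoopA (PySem.Str.splitlines analysis) false []))

-- ===== PORT B =====
def pvIsStart (line : String) : Bool :=
  let low := PySem.Str.lower line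
  PySem.Str.isIn "limitation" low || PySem.Str.isIn "scope" low

def pvIsStop (line : String) : Bool :=
  let low := PySem.Str.lower line
  ["application", "potential", "relationship", "finding", "conclusion"].any
    (fun x => PySem.Str.isIn x low)

def extract_limitations_scope_alt (analysis : String) : String :=
  let lines := PySem.Str.splitlines analysis
  match lines.findIdx? pvIsStart with    -- next((i for i,l in enumerate(lines) if _is_start(l)), None)
  | none => ""
  | some start =>
    let tail := lines.drop start         -- lines[start:], start a valid nonnegative index
    let selected :=
      match tail.findIdx? pvIsStop with  -- next((i for i,l in enumerate(tail) if _is_stop(l)), None)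
      | none => tail
      | some stop => tail.take (stop + 1)  -- tail[:stop+1]
    PySem.Str.strip (PySem.Str.join "\n" selected)

-- ===== PRECONDITION & SPEC =====
def Spec_extract_limitations_scope (analysis : String) (out : String) : Prop := out = extract_limitations_scope_alt analysis
instance (analysis : String) (out : String) : Decidable (Spec_extract_limitations_scope analysis out) := by unfold Spec_extract_limitations_scope; infer_instance

-- ===== CLAIM (what is proved, stated in full; the proofs are below) =====
def Claim_equal_extract_limitations_scope : Prop := ∀ (analysis : String), Dom_extract_limitations_scope analysis → Spec_extract_limitations_scope analysis (extract_limitations_scope analysis)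

-- ===== LEMMAS AND PROOFS =====

-- Lines collected once A's capture flag is set: each line, stopping after the first stop line.
def pvCollect : List String → List String
  | [] => []
  | x :: xs => x :: (if pvIsStop x then [] else pvCollect xs)

-- Unfolding of A's loop body, with its two inline conditions named (definitional equality).
theorem pvLoopA_cons (line : String) (rest : List String) (capture : Bool) (acc : List String) :
    pvLoopA (line :: rest) capture acc =
      (let capture := if pvIsStart line then true else capture
       if capture then
         (let acc := acc ++ [line]
          if pvIsStop line then acc else pvLoopA rest capture acc)
       else pvLoopA rest capture acc) := rfl

theorem pvLoopA_true (l : List String) : ∀ acc, pvLoopA l true acc = acc ++ pvCollect l := by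
  induction l with
  | nil => intro acc; simp [pvLoopA, pvCollect]
  | cons x xs ih =>
    intro acc
    rw [pvLoopA_cons]
    simp only [ite_self, pvCollect]
    cases hs : pvIsStop x
    · simp [ih]
    · simp

theorem pvLoopA_false (l : List String) :
    pvLoopA l false [] =
      match l.findIdx? pvIsStart with
      | none => []
      | some i => pvCollect (l.drop i) := by
  induction l with
  | nil => simp [pvLoopA]
  | cons x xs ih =>
    rw [pvLoopA_cons, List.findIdx?_cons]
    cases h : pvIsStart x
    · simp only [Bool.false_eq_true, if_false]
      rw [ih]
      cases hx : xs.findIdx? pvIsStart <;> simp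
    · simp only [List.nil_append]
      cases hs : pvIsStop x
      · simp [pvCollect, hs, pvLoopA_true]
      · simp [pvCollect, hs]

theorem pvCollect_eq (l : List String) :
    pvCollect l =
      match l.findIdx? pvIsStop with
      | none => l
      | some s => l.take (s + 1) := by
  induction l with
  | nil => simp [pvCollect]
  | cons x xs ih =>
    rw [pvCollect, List.findIdx?_cons]
    cases h : pvIsStop x
    · simp only [Bool.false_eq_true, if_false]
      rw [ih]
      cases hx : xs.findIdx? pvIsStop <;> simp
    · simp

-- ===== VERDICT (by name: the statement is the Claim_ definition above) =====
theorem extract_limitations_scope_spec : Claim_equal_extract_limitations_scope := by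
  intro analysis _
  unfold Spec_extract_limitations_scope extract_limitations_scope extract_limitations_scope_alt
  rw [pvLoopA_false]
  cases h : (PySem.Str.splitlines analysis).findIdx? pvIsStart with
  | none => simp only [h]; decide
  | some i =>
    simp only [h]
    rw [pvCollect_eq]
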